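-- pv_equiv track=rewrite | github.com/CooptGaming/CooptUI | epic_quests/scripts/generate_master_items.py | generate_epic_items_ini
-- ===== SOURCE A (Python) =====
-- from typing import Dict, List, Set, Tuple, Any
--
-- def generate_epic_items_ini(master_items: Dict) -> str:
--     """Generate epic_items_exact.ini for sell protection (shared_config). Chunked to avoid 2048 limit."""
--     items_list = sorted(master_items.keys())
--     if not items_list:
--         return "[Items]\nexact=\n"
--     value = "/".join(items_list)
--     max_chunk = 2000
--     lines = ["[Items]"]
--     if len(value) <= max_chunk:
--         lines.append(f"exact={value}")
--     else:
--         pos = 0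
--         chunk_num = 1
--         while pos < len(value):
--             end = min(pos + max_chunk, len(value))
--             chunk = value[pos:end]
--             if end < len(value):
--                 last_slash = chunk.rfind("/")
--                 if last_slash > 0:
--                     end = pos + last_slash + 1
--                     chunk = value[pos:end]
--             key = "exact" if chunk_num == 1 else f"exact{chunk_num}"
--             lines.append(f"{key}={chunk}")
--             pos = end
--             chunk_num += 1
--     return "\n".join(lines) + "\n"
-- ===== SOURCE B (Python) =====
-- def _chunks(value, limit=2000):
--     """Split value into pieces of at most `limit` chars, preferring to cut just
--     after a '/' (keeping it) when one exists past the first position."""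
--     if len(value) <= limit:
--         return [value]
--     i = value[:limit].rfind("/")
--     cut = i + 1 if i > 0 else limit
--     return [value[:cut]] + _chunks(value[cut:], limit)
--
-- def generate_epic_items_ini(master_items):
--     keys = sorted(master_items.keys())
--     if not keys:
--         return "[Items]\nexact=\n"
--     body = "\n".join(
--         ("exact=" if n == 1 else f"exact{n}=") + chunk
--         for n, chunk in enumerate(_chunks("/".join(keys)), 1)
--     )
--     return "[Items]\n" + body + "\n"
-- ===== Notes on version B (the rewrite author's own statement) =====
-- stated objective: simpler
-- what changed: A's single while loop mutating pos/chunk_num/lines with index arithmetic into the joined string is replaced by a pure recursive chunk splitter over the remaining suffix plus a separate enumerate-and-format pass joined at the end.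
import Mathlib
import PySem

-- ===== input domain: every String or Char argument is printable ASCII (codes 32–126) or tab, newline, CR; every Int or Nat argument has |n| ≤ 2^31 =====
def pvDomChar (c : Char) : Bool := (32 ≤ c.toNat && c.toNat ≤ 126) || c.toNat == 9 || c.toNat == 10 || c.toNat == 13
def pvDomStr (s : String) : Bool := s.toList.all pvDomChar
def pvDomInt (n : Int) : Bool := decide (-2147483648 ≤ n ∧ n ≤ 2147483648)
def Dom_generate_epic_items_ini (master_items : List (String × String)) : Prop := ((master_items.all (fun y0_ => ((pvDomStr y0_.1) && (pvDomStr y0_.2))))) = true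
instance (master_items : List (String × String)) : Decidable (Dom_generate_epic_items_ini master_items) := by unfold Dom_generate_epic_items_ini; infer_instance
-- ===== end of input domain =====

-- B re-implements the chunking as a standalone recursive splitter of the joined
-- string plus a one-pass enumerate/format step, instead of A's index-arithmetic
-- while loop mutating pos/chunk_num/lines (objective: simpler decomposition).

-- ===== PORT A =====
-- termination measure fact for the while loop (cited by name in decreasing_by)
theorem pvLoopA_dec (L pos : Nat) (i : Int) (h : pos < L) :
    L - (if min (pos + 2000) L < L ∧ 0 < i then pos + i.toNat + 1 else min (pos + 2000) L) < L - pos := by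
  split <;> omega

-- the while loop: state (pos, chunk_num, lines), one iteration per chunk
def pvLoopA (value : List Char) (pos : Nat) (chunk_num : Int) (lines : List (List Char)) : List (List Char) :=
  if _h : pos < value.length then
    let end1 := min (pos + 2000) value.length
    let last_slash := PySem.Chars.rfind (PySem.List.slice value (some (pos : Int)) (some (end1 : Int))) ['/']
    let end2 := if end1 < value.length ∧ 0 < last_slash then pos + last_slash.toNat + 1 else end1
    let chunk := PySem.List.slice value (some (pos : Int)) (some (end2 : Int))
    let key := if chunk_num = 1 then "exact".toList else "exact".toList ++ PySem.Int.toChars chunk_num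
    pvLoopA value end2 (chunk_num + 1) (lines ++ [key ++ '=' :: chunk])
  else lines
  termination_by value.length - pos
  decreasing_by exact pvLoopA_dec value.length pos _ _h

-- the value of `lines` as a function of the joined value string
def pvLinesA (value : List Char) : List (List Char) :=
  if value.length ≤ 2000 then ["[Items]".toList, "exact=".toList ++ value]
  else pvLoopA value 0 1 ["[Items]".toList]

def generate_epic_items_ini (master_items : List (String × String)) : String :=
  let items_list := PySem.List.sorted (PySem.Set.ofList (master_items.map Prod.fst) : List String) id
  if items_list = [] then "[Items]\nexact=\n"
  else String.ofList (PySem.Chars.join ['\n'] (pvLinesA (PySem.Chars.join ['/'] (items_list.map String.toList))) ++ ['\n'])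

-- ===== PORT B =====
-- _chunks: `cut = i + 1 if i > 0 else limit` for i = value[:limit].rfind("/")
def pvCut (value : List Char) : Nat :=
  if 0 < PySem.Chars.rfind (PySem.List.slice value none (some (2000 : Int))) ['/']
  then (PySem.Chars.rfind (PySem.List.slice value none (some (2000 : Int))) ['/']).toNat + 1
  else 2000

theorem pvCut_pos (value : List Char) : 0 < pvCut value := by
  unfold pvCut; split <;> omega

-- termination measure fact for the splitter (cited by name in decreasing_by)
theorem pvChunksB_dec (value : List Char) (h : ¬ value.length ≤ 2000) :
    (PySem.List.slice value (some ((pvCut value : Nat) : Int)) none).length < value.length := by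
  rw [PySem.List.slice_from _ (by positivity)]
  simp only [List.length_drop]
  have := pvCut_pos value
  omega

-- _chunks: recursive splitter over the remaining suffix
def pvChunksB (value : List Char) : List (List Char) :=
  if value.length ≤ 2000 then [value]
  else [PySem.List.slice value none (some (pvCut value : Int))]
        ++ pvChunksB (PySem.List.slice value (some (pvCut value : Int)) none)
  termination_by value.length
  decreasing_by exact pvChunksB_dec value (by assumption)

-- the body: every chunk formatted with its 1-based number, joined by newlines
def pvBodyB (value : List Char) : List Char :=
  PySem.Chars.join ['\n']
    ((PySem.List.enumerate (pvChunksB value) 1).map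
      (fun p => (if p.1 = 1 then "exact=".toList
                 else "exact".toList ++ PySem.Int.toChars p.1 ++ "=".toList) ++ p.2))

def generate_epic_items_ini_alt (master_items : List (String × String)) : String :=
  let keys := PySem.List.sorted (PySem.Set.ofList (master_items.map Prod.fst) : List String) id
  if keys = [] then "[Items]\nexact=\n"
  else String.ofList ("[Items]\n".toList ++ pvBodyB (PySem.Chars.join ['/'] (keys.map String.toList)) ++ ['\n'])

-- ===== PRECONDITION & SPEC =====
def Spec_generate_epic_items_ini (master_items : List (String × String)) (out : String) : Prop := out = generate_epic_items_ini_alt master_items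
instance (master_items : List (String × String)) (out : String) : Decidable (Spec_generate_epic_items_ini master_items out) := by unfold Spec_generate_epic_items_ini; infer_instance

-- ===== CLAIM (what is proved, stated in full; the proofs are below) =====
def Claim_equal_generate_epic_items_ini : Prop := ∀ (master_items : List (String × String)), Dom_generate_epic_items_ini master_items → Spec_generate_epic_items_ini master_items (generate_epic_items_ini master_items)

-- ===== LEMMAS AND PROOFS =====

-- formatting function of B's enumerate step (proof-side name for B's lambda)
def pvFmt (p : Int × List Char) : List Char :=
  (if p.1 = 1 then "exact=".toList
   else "exact".toList ++ PySem.Int.toChars p.1 ++ "=".toList) ++ p.2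

theorem pv_line_eq (num : Int) (chunk : List Char) :
    (if num = 1 then "exact".toList else "exact".toList ++ PySem.Int.toChars num) ++ '=' :: chunk
      = pvFmt (num, chunk) := by
  unfold pvFmt
  split_ifs
  · rfl
  · simp only [List.append_assoc]
    rfl

theorem pv_go_prefix (s sub : List Char) (k : Nat) (h : 0 < PySem.Chars.rfind.go s sub k) :
    sub <+: s.drop (PySem.Chars.rfind.go s sub k).toNat := by
  induction k with
  | zero =>
    rw [PySem.Chars.rfind.go] at *
    split_ifs at h ⊢ with h1 <;> omega
  | succ j ih =>
    rw [PySem.Chars.rfind.go] at h ⊢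
    split_ifs at h ⊢ with h1
    · simpa using List.isPrefixOf_iff_prefix.mp h1
    · exact ih h

theorem pv_rfind_lt_len (s sub : List Char) (hsub : sub ≠ []) (h : 0 < PySem.Chars.rfind s sub) :
    (PySem.Chars.rfind s sub).toNat < s.length := by
  rw [PySem.Chars.rfind] at h ⊢
  have hp := pv_go_prefix s sub s.length h
  have h1 : 0 < sub.length := List.length_pos_iff.mpr hsub
  have h2 := hp.length_le
  simp only [List.length_drop] at h2
  omega

theorem pvLoop_eq_aux (fuel : Nat) : ∀ (value : List Char) (pos : Nat) (num : Int) (lines : List (List Char)),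
    value.length - pos ≤ fuel → pos < value.length →
    pvLoopA value pos num lines =
      lines ++ (PySem.List.enumerate (pvChunksB (value.drop pos)) num).map pvFmt := by
  induction fuel with
  | zero => intro value pos num lines hf hp; omega
  | succ f ih =>
    intro value pos num lines hf hp
    rw [pvLoopA]
    simp only [dif_pos hp]
    by_cases hle : value.length ≤ pos + 2000
    · -- last chunk: the remaining suffix fits
      have hmin : min (pos + 2000) value.length = value.length := by omega
      rw [hmin]
      simp only [lt_irrefl, false_and, if_false]
      rw [PySem.List.slice_natCast]
      have hchunk : List.take (value.length - pos) (List.drop pos value) = List.drop pos value := by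
        apply List.take_of_length_le; simp
      rw [hchunk]
      rw [pvLoopA]
      simp only [dif_neg (lt_irrefl value.length)]
      rw [pvChunksB]
      have hlen2 : (value.drop pos).length ≤ 2000 := by simp; omega
      rw [if_pos hlen2]
      rw [PySem.List.enumerate, PySem.List.enumerate]
      simp only [List.map_cons, List.map_nil]
      rw [pv_line_eq]
    · -- a middle chunk
      have hmin : min (pos + 2000) value.length = pos + 2000 := by omega
      rw [hmin]
      have hwinA : PySem.List.slice value (some (pos : Int)) (some ((pos + 2000 : Nat) : Int))
          = List.take 2000 (List.drop pos value) := by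
        rw [PySem.List.slice_natCast]; congr 1; omega
      rw [pvChunksB]
      have hlen2 : ¬ (value.drop pos).length ≤ 2000 := by simp; omega
      rw [if_neg hlen2]
      have hwinB : PySem.List.slice (value.drop pos) none (some (2000 : Int))
          = List.take 2000 (List.drop pos value) := by
        rw [PySem.List.slice_to _ (by norm_num)]; rfl
      rw [hwinA]
      set i := PySem.Chars.rfind (List.take 2000 (List.drop pos value)) ['/'] with hidef
      by_cases hi : 0 < i
      · have hiband : i.toNat < 2000 := by
          have := pv_rfind_lt_len (List.take 2000 (List.drop pos value)) ['/'] (by simp) hi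
          simp at this
          omega
        have hcond : (pos + 2000 < value.length ∧ 0 < i) := ⟨by omega, hi⟩
        have hcut : pvCut (value.drop pos) = i.toNat + 1 := by
          unfold pvCut; rw [hwinB, ← hidef, if_pos hi]
        rw [if_pos hcond, hcut]
        have hchunkA : PySem.List.slice value (some (pos : Int)) (some ((pos + i.toNat + 1 : Nat) : Int))
            = List.take (i.toNat + 1) (List.drop pos value) := by
          rw [PySem.List.slice_natCast]; congr 1; omega
        have hchunkB : PySem.List.slice (value.drop pos) none (some ((i.toNat + 1 : Nat) : Int))
            = List.take (i.toNat + 1) (List.drop pos value) := by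
          rw [PySem.List.slice_to _ (by positivity)]; congr 1
        have htail : PySem.List.slice (value.drop pos) (some ((i.toNat + 1 : Nat) : Int)) none
            = value.drop (pos + i.toNat + 1) := by
          rw [PySem.List.slice_from _ (by positivity)]
          rw [List.drop_drop]; congr 1
        rw [hchunkA, hchunkB, htail]
        rw [ih value (pos + i.toNat + 1) (num + 1) _ (by omega) (by omega)]
        rw [List.singleton_append, PySem.List.enumerate]
        simp only [List.map_cons, List.append_assoc]
        rw [pv_line_eq]
        simp only [List.singleton_append]
      · have hcond : ¬ (pos + 2000 < value.length ∧ 0 < i) := by tauto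
        have hcut : pvCut (value.drop pos) = 2000 := by
          unfold pvCut; rw [hwinB, ← hidef, if_neg hi]
        rw [if_neg hcond, hcut]
        have hchunkA : PySem.List.slice value (some (pos : Int)) (some ((pos + 2000 : Nat) : Int))
            = List.take 2000 (List.drop pos value) := by
          rw [PySem.List.slice_natCast]; congr 1; omega
        have hchunkB : PySem.List.slice (value.drop pos) none (some ((2000 : Nat) : Int))
            = List.take 2000 (List.drop pos value) := by
          rw [PySem.List.slice_to _ (by positivity)]; congr 1
        have htail : PySem.List.slice (value.drop pos) (some ((2000 : Nat) : Int)) none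
            = value.drop (pos + 2000) := by
          rw [PySem.List.slice_from _ (by positivity)]
          rw [List.drop_drop]; congr 1
        rw [hchunkA, hchunkB, htail]
        rw [ih value (pos + 2000) (num + 1) _ (by omega) (by omega)]
        rw [List.singleton_append, PySem.List.enumerate]
        simp only [List.map_cons, List.append_assoc]
        rw [pv_line_eq]
        simp only [List.singleton_append]

theorem pv_body_eq (value : List Char) :
    PySem.Chars.join ['\n'] (pvLinesA value) ++ ['\n']
      = "[Items]\n".toList ++ pvBodyB value ++ ['\n'] := by
  have hfmt : (fun p : Int × List Char =>
      (if p.1 = 1 then "exact=".toList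
       else "exact".toList ++ PySem.Int.toChars p.1 ++ "=".toList) ++ p.2) = pvFmt := rfl
  unfold pvLinesA pvBodyB
  rw [hfmt]
  by_cases hlen : value.length ≤ 2000
  · rw [if_pos hlen]
    rw [pvChunksB, if_pos hlen]
    rw [PySem.List.enumerate, PySem.List.enumerate]
    simp only [List.map_cons, List.map_nil]
    rw [PySem.Chars.join_cons_cons, PySem.Chars.join_singleton, PySem.Chars.join_singleton]
    unfold pvFmt
    simp only [List.append_assoc]
    rfl
  · rw [if_neg hlen]
    rw [pvLoop_eq_aux value.length value 0 1 _ (by omega) (by omega)]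
    rw [List.drop_zero]
    rw [pvChunksB, if_neg hlen]
    have henum : ∀ (a : List Char) (l : List (List Char)) (n : Int),
        PySem.List.enumerate (a :: l) n = (n, a) :: PySem.List.enumerate l (n + 1) := by
      intro a l n; rw [PySem.List.enumerate]
    simp only [List.singleton_append]
    rw [henum]
    simp only [List.map_cons]
    rw [PySem.Chars.join_cons_cons]
    simp only [List.append_assoc]
    rfl

-- ===== VERDICT (by name: the statement is the Claim_ definition above) =====
theorem generate_epic_items_ini_spec : Claim_equal_generate_epic_items_ini := by
  intro master_items _
  unfold Spec_generate_epic_items_ini generate_epic_items_ini generate_epic_items_ini_alt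
  by_cases hk : PySem.List.sorted (PySem.Set.ofList (master_items.map Prod.fst) : List String) id = []
  · rw [if_pos hk, if_pos hk]
  · rw [if_neg hk, if_neg hk, pv_body_eq]
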